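-- pv_equiv track=rewrite | github.com/lauren-mh16/pubmed_related | articles_by_cat/evidence_viewer/export_github_pages.py | rewrite_html_for_github_pages
-- ===== SOURCE A (Python) =====
-- GITHUB_PAGES_CSS_NAME = "github_pages.css"
--
-- GITHUB_PAGES_CSS_VERSION = "20260427a"
--
-- def rewrite_html_for_github_pages(html_text: str) -> str:
--     out_lines: list[str] = []
--     inserted_stylesheet = False
--     stylesheet_line = (
--         f'  <link rel="stylesheet" href="./{GITHUB_PAGES_CSS_NAME}?v={GITHUB_PAGES_CSS_VERSION}" '
--         'type="text/css">'
--     )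
--
--     for line in html_text.splitlines():
--         stripped = line.strip()
--         if stripped.startswith('<link rel="stylesheet" href="https://cdn.ncbi.nlm.nih.gov/pubmed/'):
--             continue
--         if stripped.startswith('<link rel="stylesheet" href="./styles.css'):
--             if not inserted_stylesheet:
--                 out_lines.append(stylesheet_line)
--                 inserted_stylesheet = True
--             continue
--         out_lines.append(line)
--
--     if not inserted_stylesheet:
--         rewritten: list[str] = []
--         for line in out_lines:
--             if line.strip() == "</head>":
--                 rewritten.append(stylesheet_line)
--                 inserted_stylesheet = True
--             rewritten.append(line)
--         out_lines = rewritten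
--
--     return "\n".join(out_lines) + "\n"
-- ===== SOURCE B (Python) =====
-- GITHUB_PAGES_CSS_NAME = "github_pages.css"
--
-- GITHUB_PAGES_CSS_VERSION = "20260427a"
--
-- def rewrite_html_for_github_pages(html_text: str) -> str:
--     stylesheet_line = (
--         f'  <link rel="stylesheet" href="./{GITHUB_PAGES_CSS_NAME}?v={GITHUB_PAGES_CSS_VERSION}" '
--         'type="text/css">'
--     )
--     lines = html_text.splitlines()
--     has_styles = any(
--         line.strip().startswith('<link rel="stylesheet" href="./styles.css')
--         for line in lines
--     )
--     out: list[str] = []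
--     replaced = False
--     for line in lines:
--         stripped = line.strip()
--         if stripped.startswith('<link rel="stylesheet" href="https://cdn.ncbi.nlm.nih.gov/pubmed/'):
--             continue
--         if has_styles:
--             if stripped.startswith('<link rel="stylesheet" href="./styles.css'):
--                 if not replaced:
--                     out.append(stylesheet_line)
--                     replaced = True
--                 continue
--         elif stripped == "</head>":
--             out.append(stylesheet_line)
--         out.append(line)
--     return "\n".join(out) + "\n"
-- ===== Notes on version B (the rewrite author's own statement) =====
-- stated objective: alternative
-- what changed: B precomputes in one scan whether any local stylesheet link exists and then builds the output in a single fused pass (replacing that link or inserting before each closing head tag as it goes), instead of A's pass that may be followed by a second full rebuild of the output list.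
import Mathlib
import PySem

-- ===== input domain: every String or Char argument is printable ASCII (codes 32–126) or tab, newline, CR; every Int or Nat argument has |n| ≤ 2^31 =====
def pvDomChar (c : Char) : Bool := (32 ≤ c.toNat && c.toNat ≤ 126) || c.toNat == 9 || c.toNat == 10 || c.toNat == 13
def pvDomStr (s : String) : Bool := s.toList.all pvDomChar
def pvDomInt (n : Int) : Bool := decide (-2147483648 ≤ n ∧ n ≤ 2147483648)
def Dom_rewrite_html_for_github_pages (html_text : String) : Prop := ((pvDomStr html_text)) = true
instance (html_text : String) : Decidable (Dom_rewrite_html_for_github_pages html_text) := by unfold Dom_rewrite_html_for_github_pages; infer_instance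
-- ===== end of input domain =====

-- B replaces A's conditional second rebuild pass by a precomputed "has styles link" flag
-- and one fused output pass; objective: alternative (same cost, plainer control flow).

-- ===== PORT A =====
-- shared string constants of the module
def pvSL : String := "  <link rel=\"stylesheet\" href=\"./github_pages.css?v=20260427a\" type=\"text/css\">"
def pvCdn : String := "<link rel=\"stylesheet\" href=\"https://cdn.ncbi.nlm.nih.gov/pubmed/"
def pvSty : String := "<link rel=\"stylesheet\" href=\"./styles.css"

-- A's first loop: state (out_lines, inserted_stylesheet)
def pvLoopA : List String → List String → Bool → List String × Bool
  | [], acc, ins => (acc, ins)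
  | l :: ls, acc, ins =>
    let stripped := PySem.Str.strip l
    if PySem.Str.startswith stripped pvCdn then pvLoopA ls acc ins
    else if PySem.Str.startswith stripped pvSty then
      if ins then pvLoopA ls acc ins else pvLoopA ls (acc ++ [pvSL]) true
    else pvLoopA ls (acc ++ [l]) ins

-- A's second loop (the `inserted_stylesheet = True` it sets is never read afterwards, so it is not part of the state)
def pvLoop2 : List String → List String → List String
  | [], acc => acc
  | l :: ls, acc =>
    if PySem.Str.strip l = "</head>" then pvLoop2 ls (acc ++ [pvSL, l])
    else pvLoop2 ls (acc ++ [l])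

def rewrite_html_for_github_pages (html_text : String) : String :=
  let p := pvLoopA (PySem.Str.splitlines html_text) [] false
  let out_lines := if p.2 then p.1 else pvLoop2 p.1 []
  PySem.Str.join "\n" out_lines ++ "\n"

-- ===== PORT B =====
def pvHas (ls : List String) : Bool :=
  ls.any (fun l => PySem.Str.startswith (PySem.Str.strip l) pvSty)

-- B's single output loop: state (out, replaced)
def pvLoopB (has : Bool) : List String → List String → Bool → List String
  | [], acc, _ => acc
  | l :: ls, acc, rep =>
    let stripped := PySem.Str.strip l
    if PySem.Str.startswith stripped pvCdn then pvLoopB has ls acc rep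
    else if has then
      if PySem.Str.startswith stripped pvSty then
        if rep then pvLoopB has ls acc rep else pvLoopB has ls (acc ++ [pvSL]) true
      else pvLoopB has ls (acc ++ [l]) rep
    else if stripped = "</head>" then pvLoopB has ls (acc ++ [pvSL, l]) rep
    else pvLoopB has ls (acc ++ [l]) rep

def rewrite_html_for_github_pages_alt (html_text : String) : String :=
  let lines := PySem.Str.splitlines html_text
  PySem.Str.join "\n" (pvLoopB (pvHas lines) lines [] false) ++ "\n"

-- ===== PRECONDITION & SPEC =====
def Spec_rewrite_html_for_github_pages (html_text : String) (out : String) : Prop := out = rewrite_html_for_github_pages_alt html_text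
instance (html_text : String) (out : String) : Decidable (Spec_rewrite_html_for_github_pages html_text out) := by unfold Spec_rewrite_html_for_github_pages; infer_instance

-- ===== CLAIM (what is proved, stated in full; the proofs are below) =====
def Claim_equal_rewrite_html_for_github_pages : Prop := ∀ (html_text : String), Dom_rewrite_html_for_github_pages html_text → Spec_rewrite_html_for_github_pages html_text (rewrite_html_for_github_pages html_text)

-- ===== LEMMAS AND PROOFS =====

-- the two link prefixes are incompatible: no stripped line starts with both
theorem pv_disj (s : String) (h : PySem.Str.startswith s pvCdn = true) :
    PySem.Str.startswith s pvSty = false := by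
  by_contra hne
  have h2 : PySem.Str.startswith s pvSty = true := by
    cases hh : PySem.Str.startswith s pvSty with
    | true => rfl
    | false => exact absurd hh hne
  have p1 : pvCdn.toList <+: s.toList := by
    simpa [PySem.Str.startswith_eq, PySem.Chars.startswith_iff] using h
  have p2 : pvSty.toList <+: s.toList := by
    simpa [PySem.Str.startswith_eq, PySem.Chars.startswith_iff] using h2
  rcases List.prefix_or_prefix_of_prefix p1 p2 with hc | hc
  · have : ¬ (pvCdn.toList <+: pvSty.toList) := by decide
    exact this hc
  · have : ¬ (pvSty.toList <+: pvCdn.toList) := by decide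
    exact this hc

theorem pvLoopA_acc (ls : List String) : ∀ acc ins,
    pvLoopA ls acc ins = (acc ++ (pvLoopA ls [] ins).1, (pvLoopA ls [] ins).2) := by
  induction ls with
  | nil => intro acc ins; simp [pvLoopA]
  | cons l ls ih =>
    intro acc ins
    simp only [pvLoopA]
    split_ifs with h1 h2 h3
    · exact ih acc ins
    · exact ih acc ins
    · simp only [List.nil_append]
      rw [ih (acc ++ [pvSL]) true, ih [pvSL] true]
      simp
    · simp only [List.nil_append]
      rw [ih (acc ++ [l]) ins, ih [l] ins]
      simp

theorem pvLoop2_acc (ls : List String) : ∀ acc,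
    pvLoop2 ls acc = acc ++ pvLoop2 ls [] := by
  induction ls with
  | nil => intro acc; simp [pvLoop2]
  | cons l ls ih =>
    intro acc
    simp only [pvLoop2]
    split_ifs with h1
    · simp only [List.nil_append]
      rw [ih (acc ++ [pvSL, l]), ih [pvSL, l]]
      simp
    · simp only [List.nil_append]
      rw [ih (acc ++ [l]), ih [l]]
      simp

theorem pvHas_cons (l : String) (ls : List String) :
    pvHas (l :: ls) = (PySem.Str.startswith (PySem.Str.strip l) pvSty || pvHas ls) := by
  simp [pvHas]

theorem pvLoop2_cons (l : String) (ls : List String) :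
    pvLoop2 (l :: ls) [] =
      (if PySem.Str.strip l = "</head>" then [pvSL, l] else [l]) ++ pvLoop2 ls [] := by
  simp only [pvLoop2, List.nil_append]
  split_ifs with h
  · rw [pvLoop2_acc ls [pvSL, l]]
  · rw [pvLoop2_acc ls [l]]

-- the flag after A's first loop is exactly "some line starts with the styles prefix"
theorem pvLoopA_flag (ls : List String) : ∀ acc ins,
    (pvLoopA ls acc ins).2 = (ins || pvHas ls) := by
  induction ls with
  | nil => intro acc ins; simp [pvLoopA, pvHas]
  | cons l ls ih =>
    intro acc ins
    simp only [pvLoopA]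
    split_ifs with h1 h2 h3
    · rw [ih, pvHas_cons, pv_disj _ h1, Bool.false_or]
    · rw [ih, pvHas_cons, h3]
      simp
    · simp only [Bool.not_eq_true] at h3
      rw [ih, pvHas_cons, h2, h3]
      simp
    · simp only [Bool.not_eq_true] at h2
      rw [ih, pvHas_cons, h2, Bool.false_or]

-- when a styles link exists, B's fused pass is A's first pass
theorem pvLoopB_true (ls : List String) : ∀ acc ins,
    pvLoopB true ls acc ins = (pvLoopA ls acc ins).1 := by
  induction ls with
  | nil => intro acc ins; simp [pvLoopA, pvLoopB]
  | cons l ls ih =>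
    intro acc ins
    simp only [pvLoopA, pvLoopB, if_true]
    split_ifs <;> apply ih

-- when none exists, B's fused pass is A's second pass applied to A's first pass
theorem pvLoopB_false (ls : List String)
    (hn : ∀ l ∈ ls, PySem.Str.startswith (PySem.Str.strip l) pvSty = false) : ∀ acc rep,
    pvLoopB false ls acc rep = acc ++ pvLoop2 (pvLoopA ls [] false).1 [] := by
  induction ls with
  | nil => intro acc rep; simp [pvLoopA, pvLoopB, pvLoop2]
  | cons l ls ih =>
    intro acc rep
    have hl := hn l (List.mem_cons_self ..)
    have hrest : ∀ x ∈ ls, PySem.Str.startswith (PySem.Str.strip x) pvSty = false :=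
      fun x hx => hn x (List.mem_cons_of_mem _ hx)
    simp only [pvLoopA, pvLoopB, hl, List.nil_append, Bool.false_eq_true, if_false]
    split_ifs with h1 h2
    · exact ih hrest acc rep
    · rw [ih hrest, pvLoopA_acc ls [l] false]
      simp [pvLoop2_cons, h2]
    · rw [ih hrest, pvLoopA_acc ls [l] false]
      simp [pvLoop2_cons, h2]

-- ===== VERDICT (by name: the statement is the Claim_ definition above) =====
theorem rewrite_html_for_github_pages_spec : Claim_equal_rewrite_html_for_github_pages := by
  intro html_text _
  unfold Spec_rewrite_html_for_github_pages
  unfold rewrite_html_for_github_pages rewrite_html_for_github_pages_alt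
  set ls := PySem.Str.splitlines html_text with hls
  have hflag : (pvLoopA ls [] false).2 = pvHas ls := by
    simpa using pvLoopA_flag ls [] false
  by_cases h : pvHas ls = true
  · simp only [hflag, h, if_true]
    rw [pvLoopB_true]
  · have h' : pvHas ls = false := by
      cases hh : pvHas ls with
      | true => exact absurd hh h
      | false => rfl
    have hn : ∀ l ∈ ls, PySem.Str.startswith (PySem.Str.strip l) pvSty = false := by
      simpa [pvHas, List.any_eq_false] using h'
    simp only [hflag, h', Bool.false_eq_true, if_false]
    rw [pvLoopB_false ls hn [] false]
    simp
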